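-- pv_equiv track=rewrite | github.com/namjmnam/obj_welding | package/utils.py | nan_correct
-- ===== SOURCE A (Python) =====
-- def nan_correct(faces, nan_vertices):
--     modified_faces = []
--     for lst in faces:
--         modified_list = []
--         for value in lst:
--             # Count the number of numbers in the first list that are smaller than the current value
--             count_smaller = sum(1 for num in nan_vertices if num < value)
--             # Subtract the count from the value
--             modified_value = value - count_smaller
--             modified_list.append(modified_value)
--         modified_faces.append(modified_list)
--     return modified_faces
-- ===== SOURCE B (Python) =====
-- def nan_correct(faces, nan_vertices):
--     # Sort once; for each face value, the number of nan vertices smaller than it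
--     # is its insertion point (bisect_left) in the sorted list.
--     s = sorted(nan_vertices)
--     n = len(s)
--
--     def bisect_left(x):
--         lo, hi = 0, n
--         while lo < hi:
--             mid = (lo + hi) // 2
--             if s[mid] < x:
--                 lo = mid + 1
--             else:
--                 hi = mid
--         return lo
--
--     return [[v - bisect_left(v) for v in lst] for lst in faces]
-- ===== Notes on version B (the rewrite author's own statement) =====
-- stated objective: faster
-- what changed: Instead of rescanning nan_vertices for every face value, B sorts nan_vertices once and counts smaller entries per value by binary search (bisect_left), building the result with comprehensions.
import Mathlib
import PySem

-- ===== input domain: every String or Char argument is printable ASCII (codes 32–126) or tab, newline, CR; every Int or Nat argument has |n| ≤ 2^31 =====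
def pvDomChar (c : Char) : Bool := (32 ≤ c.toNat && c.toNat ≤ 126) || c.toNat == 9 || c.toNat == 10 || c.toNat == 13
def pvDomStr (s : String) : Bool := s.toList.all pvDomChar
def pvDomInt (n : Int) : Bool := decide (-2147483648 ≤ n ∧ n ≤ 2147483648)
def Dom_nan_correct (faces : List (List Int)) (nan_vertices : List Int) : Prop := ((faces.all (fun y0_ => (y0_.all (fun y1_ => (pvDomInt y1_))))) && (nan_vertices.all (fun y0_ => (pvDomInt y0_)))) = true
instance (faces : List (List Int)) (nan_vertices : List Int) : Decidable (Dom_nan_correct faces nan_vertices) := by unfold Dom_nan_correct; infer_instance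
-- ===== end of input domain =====

-- B sorts nan_vertices once and per face value counts smaller entries by binary search
-- (bisect_left) instead of rescanning nan_vertices for every value (objective: faster).

-- ===== PORT A =====
def nan_correct (faces : List (List Int)) (nan_vertices : List Int) : List (List Int) :=
  faces.foldl (fun modified_faces lst =>
    modified_faces ++ [lst.foldl (fun modified_list value =>
      let count_smaller : Int :=
        nan_vertices.foldl (fun acc num => if num < value then acc + 1 else acc) 0
      modified_list ++ [value - count_smaller]) []]) []

-- ===== PORT B =====
-- Source B's hand-written bisect_left while-loop is exactly PySem.List.bisectLeft's loop.
def nan_correct_alt (faces : List (List Int)) (nan_vertices : List Int) : List (List Int) :=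
  let s := PySem.List.sorted nan_vertices (fun x => x) false
  faces.map (fun lst => lst.map (fun v => v - (PySem.List.bisectLeft s v : Int)))

-- ===== PRECONDITION & SPEC =====
def Spec_nan_correct (faces : List (List Int)) (nan_vertices : List Int) (out : List (List Int)) : Prop := out = nan_correct_alt faces nan_vertices
instance (faces : List (List Int)) (nan_vertices : List Int) (out : List (List Int)) : Decidable (Spec_nan_correct faces nan_vertices out) := by unfold Spec_nan_correct; infer_instance

-- ===== CLAIM (what is proved, stated in full; the proofs are below) =====
def Claim_equal_nan_correct : Prop := ∀ (faces : List (List Int)) (nan_vertices : List Int), Dom_nan_correct faces nan_vertices → Spec_nan_correct faces nan_vertices (nan_correct faces nan_vertices)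

-- ===== LEMMAS AND PROOFS =====

-- A's inner 0/1-accumulating fold is countP.
theorem foldl_count_lt (nv : List Int) (v : Int) (acc : Int) :
    nv.foldl (fun acc num => if num < v then acc + 1 else acc) acc
      = acc + (nv.countP (fun num => decide (num < v)) : Int) := by
  induction nv generalizing acc with
  | nil => simp
  | cons x xs ih =>
    simp only [List.foldl_cons, List.countP_cons, ih]
    by_cases h : x < v
    · simp [h]; ring
    · simp [h]

-- On a sorted list, bisectLeft is the count of strictly smaller elements.
theorem bisectLeft_eq_countP (s : List Int) (v : Int)
    (hs : s.Pairwise (fun a b => a ≤ b)) :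
    s.countP (fun num => decide (num < v)) = PySem.List.bisectLeft s v := by
  obtain ⟨hle, hlt, hge⟩ := PySem.List.bisectLeft_spec s v hs
  set r := PySem.List.bisectLeft s v with hr
  have hsplit : s = s.take r ++ s.drop r := (List.take_append_drop r s).symm
  have h1 : (s.take r).countP (fun num => decide (num < v)) = (s.take r).length := by
    apply List.countP_eq_length.mpr
    intro a ha
    obtain ⟨j, hj, rfl⟩ := List.mem_iff_getElem.mp ha
    have hjr : j < r := lt_of_lt_of_le hj (by simp)
    have hjs : j < s.length := lt_of_lt_of_le hjr hle
    have := hlt j hjs hjr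
    simpa [List.getElem_take] using this
  have h2 : (s.drop r).countP (fun num => decide (num < v)) = 0 := by
    apply List.countP_eq_zero.mpr
    intro a ha
    obtain ⟨j, hj, rfl⟩ := List.mem_iff_getElem.mp ha
    have hjs : r + j < s.length := by
      have := hj; simp [List.length_drop] at this; omega
    have hge' := hge (r + j) hjs (Nat.le_add_right r j)
    simp only [List.getElem_drop]
    simpa using not_lt.mpr hge'
  calc s.countP (fun num => decide (num < v))
      = (s.take r ++ s.drop r).countP (fun num => decide (num < v)) := by rw [← hsplit]
    _ = (s.take r).length + 0 := by rw [List.countP_append, h1, h2]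
    _ = r := by simp [List.length_take]; exact hle

theorem count_eq_bisect (nv : List Int) (v : Int) :
    nv.foldl (fun acc num => if num < v then acc + 1 else acc) (0 : Int)
      = (PySem.List.bisectLeft (PySem.List.sorted nv (fun x => x) false) v : Int) := by
  set s := PySem.List.sorted nv (fun x => x) false with hsdef
  have hperm : s.Perm nv := PySem.List.sorted_perm nv (fun x => x) false
  have hpw : s.Pairwise (fun a b => a ≤ b) := by
    simpa using PySem.List.sorted_pairwise nv (fun x => x)
  rw [foldl_count_lt, zero_add, ← hperm.countP_eq, bisectLeft_eq_countP s v hpw]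

-- ===== VERDICT (by name: the statement is the Claim_ definition above) =====
theorem nan_correct_spec : Claim_equal_nan_correct := by
  intro faces nan_vertices _
  unfold Spec_nan_correct nan_correct nan_correct_alt
  simp only [PySem.List.foldl_append_singleton_eq_map, List.nil_append, count_eq_bisect]
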